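-- pv_equiv track=rewrite | github.com/miliar/Code_Jam_Webscraper | Solutions_python/Problem_138/1082.py | get_score_of_war
-- ===== SOURCE A (Python) =====
-- def get_score_of_war(n,k,num):
--     n.sort(reverse = True)
--     k.sort(reverse = True)
--     score = 0
--     for i in range(num):
--         if(n[0]>k[0]):
--             n.remove(n[0])
--             x = k.pop()
--             score += 1
--         else:
--             val = get_opt_num(n[0],k)
--             k.remove(val)
--             n.remove(n[0])
--     return score
--
-- def get_opt_num(val1,l):
--     l.sort(reverse = True)
--     i = 0
--     for elem in l:
--         if elem > val1:
--             i += 1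
--             continue
--         else:
--           break
--     return l[i-1]
-- ===== SOURCE B (Python) =====
-- def get_score_of_war(n, k, num):
--     ns = sorted(n, reverse=True)
--     ka = sorted(k)
--     score = 0
--     for t in range(num):
--         x = ns[t]
--         if x > ka[-1]:
--             score += 1
--             del ka[0]
--         else:
--             lo, hi = 0, len(ka)
--             while lo < hi:
--                 mid = (lo + hi) // 2
--                 if ka[mid] <= x:
--                     lo = mid + 1
--                 else:
--                     hi = mid
--             if lo == len(ka):
--                 del ka[0]
--             else:
--                 del ka[lo]
--     return score
-- ===== Notes on version B (the rewrite author's own statement) =====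
-- stated objective: faster
-- what changed: B sorts each list exactly once (n descending, k ascending) and plays every round by index over n's sorted prefix, locating Ken's smallest beating card by a hand-rolled binary search and erasing it by position, instead of A's per-round re-sort of k, linear re-scan in get_opt_num and remove-by-value/pop mutations.
import Mathlib
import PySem

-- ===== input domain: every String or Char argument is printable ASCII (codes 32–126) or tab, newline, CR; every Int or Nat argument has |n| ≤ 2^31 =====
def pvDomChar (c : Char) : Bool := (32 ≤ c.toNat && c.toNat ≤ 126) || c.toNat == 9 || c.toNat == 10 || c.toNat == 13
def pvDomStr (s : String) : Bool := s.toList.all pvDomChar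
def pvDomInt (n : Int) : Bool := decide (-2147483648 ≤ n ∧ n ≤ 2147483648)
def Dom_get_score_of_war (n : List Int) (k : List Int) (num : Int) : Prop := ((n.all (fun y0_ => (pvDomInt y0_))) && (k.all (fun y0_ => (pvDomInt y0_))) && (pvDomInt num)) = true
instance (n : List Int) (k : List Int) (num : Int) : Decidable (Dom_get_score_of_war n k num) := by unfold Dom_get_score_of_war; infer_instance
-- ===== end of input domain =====

-- B sorts each list once (n descending, k ascending) and plays the rounds by index
-- and position-erasure, instead of A's per-round re-sort, linear re-scan and
-- remove-by-value; equivalence is about the RETURN value only (A sorts/empties the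
-- caller's lists in place, B leaves them untouched).


-- ===== PORT A =====
-- 'i = 0; for elem in l: if elem > val1: i += 1; continue; else: break'
def pvCountGreater (val1 : Int) : List Int → Int → Int
  | [], i => i
  | e :: es, i => if e > val1 then pvCountGreater val1 es (i + 1) else i

-- get_opt_num sorts l in place and returns l[i-1]; the port returns the pair
-- (l after the in-place sort, the looked-up value; none = IndexError).
def get_opt_num (val1 : Int) (l : List Int) : List Int × Option Int :=
  let l' := PySem.List.sorted l (fun x => x) true
  let i := pvCountGreater val1 l' 0
  (l', PySem.List.pyGet? l' (i - 1))

-- one iteration of A's 'for i in range(num)' body; none = an exception was raised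
def pvStepA (st : Option (List Int × List Int × Int)) : Option (List Int × List Int × Int) :=
  match st with
  | none => none
  | some (n, k, score) =>
    match PySem.List.pyGet? n 0, PySem.List.pyGet? k 0 with
    | some n0, some k0 =>
      if n0 > k0 then
        match PySem.List.remove? n n0, PySem.List.pop? k (-1) with
        | some n', some kr => some (n', kr.2, score + 1)
        | _, _ => none
      else
        match get_opt_num n0 k with
        | (ks, some val) =>
          match PySem.List.remove? ks val, PySem.List.remove? n n0 with
          | some k', some n' => some (n', k', score)
          | _, _ => none
        | (_, none) => none
    | _, _ => none

def get_score_of_war (n : List Int) (k : List Int) (num : Int) : Int :=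
  match (List.range num.toNat).foldl (fun st _ => pvStepA st)
      (some (PySem.List.sorted n (fun x => x) true, PySem.List.sorted k (fun x => x) true, 0)) with
  | some (_, _, s) => s
  | none => 0

-- ===== PORT B =====
-- 'lo, hi = 0, len(ka); while lo < hi: mid = (lo+hi)//2; ...' — B's hand-rolled
-- binary search; ka[mid] is in range whenever hi ≤ len(ka), where getD is exact
def pvBisect (ka : List Int) (x : Int) (lo hi : Nat) : Nat :=
  if lo < hi then
    let mid := (lo + hi) / 2
    if ka.getD mid 0 ≤ x then pvBisect ka x (mid + 1) hi else pvBisect ka x lo mid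
  else lo
termination_by hi - lo
decreasing_by all_goals omega

-- one iteration of B's loop: state = (ka, score); none = an exception was raised
def pvStepB (ns : List Int) (st : Option (List Int × Int)) (t : Nat) : Option (List Int × Int) :=
  match st with
  | none => none
  | some (ka, score) =>
    match PySem.List.pyGet? ns (t : Int), PySem.List.pyGet? ka (-1) with
    | some x, some last =>
      if x > last then some (ka.eraseIdx 0, score + 1)
      else
        let j := pvBisect ka x 0 ka.length
        if j = ka.length then some (ka.eraseIdx 0, score)
        else some (ka.eraseIdx j, score)
    | _, _ => none

def get_score_of_war_alt (n : List Int) (k : List Int) (num : Int) : Int :=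
  match (List.range num.toNat).foldl
      (pvStepB (PySem.List.sorted n (fun x => x) true))
      (some (PySem.List.sorted k (fun x => x) false, 0)) with
  | some (_, s) => s
  | none => 0

-- ===== PRECONDITION & SPEC =====
-- A raises IndexError (n[0]/k[0]/pop on an emptied list) exactly when num exceeds a list's length.
def Pre_get_score_of_war (n : List Int) (k : List Int) (num : Int) : Prop :=
  num ≤ (n.length : Int) ∧ num ≤ (k.length : Int)
instance (n : List Int) (k : List Int) (num : Int) : Decidable (Pre_get_score_of_war n k num) := by unfold Pre_get_score_of_war; infer_instance

def pvWitness_get_score_of_war : List Int × List Int × Int := ([3, 1, 2], [2, 2, 1], 3)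

def Spec_get_score_of_war (n : List Int) (k : List Int) (num : Int) (out : Int) : Prop := out = get_score_of_war_alt n k num
instance (n : List Int) (k : List Int) (num : Int) (out : Int) : Decidable (Spec_get_score_of_war n k num out) := by unfold Spec_get_score_of_war; infer_instance

-- ===== CLAIM (what is proved, stated in full; the proofs are below) =====
def Claim_equal_get_score_of_war : Prop := ∀ (n : List Int) (k : List Int) (num : Int), Dom_get_score_of_war n k num → Pre_get_score_of_war n k num → Spec_get_score_of_war n k num (get_score_of_war n k num)

-- ===== LEMMAS AND PROOFS =====

-- two descending-sorted lists that are permutations of each other are equal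
theorem pvDescEq {l1 l2 : List Int} (h1 : l1.Pairwise (fun a b => b ≤ a))
    (h2 : l2.Pairwise (fun a b => b ≤ a)) (hp : l1.Perm l2) : l1 = l2 := by
  refine PySem.List.eq_of_perm_of_pairwise_le_of_injective (key := fun v : Int => -v) ?_ hp ?_ ?_
  · exact neg_injective
  · exact h1.imp (by intro a b h; simpa using h)
  · exact h2.imp (by intro a b h; simpa using h)

theorem pvCountGreater_eq (x : Int) : ∀ (l : List Int) (i : Int),
    pvCountGreater x l i = i + ((l.takeWhile (fun e => decide (x < e))).length : Int) := by
  intro l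
  induction l with
  | nil => intro i; simp [pvCountGreater]
  | cons e es ih =>
    intro i
    by_cases h : x < e
    · simp [pvCountGreater, h, ih]
      omega
    · have h' : ¬ e > x := h
      simp [pvCountGreater, h]

theorem pvBisect_eq (ka : List Int) (x : Int) (hpw : ka.Pairwise (fun a b : Int => a ≤ b))
    (lo hi : Nat) (h1 : lo ≤ (ka.takeWhile (fun y => decide (y ≤ x))).length)
    (h2 : (ka.takeWhile (fun y => decide (y ≤ x))).length ≤ hi) (h3 : hi ≤ ka.length) :
    pvBisect ka x lo hi = (ka.takeWhile (fun y => decide (y ≤ x))).length := by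
  set L := (ka.takeWhile (fun y => decide (y ≤ x))).length with hL
  have hLlen : L ≤ ka.length := (List.takeWhile_prefix _).length_le
  have F1 : ∀ (i : Nat) (h : i < ka.length), i < L → ka[i] ≤ x := by
    intro i h hiL
    have hi' : i < (ka.takeWhile (fun y => decide (y ≤ x))).length := by omega
    have hpx := List.mem_takeWhile_imp (List.getElem_mem hi')
    rw [(List.takeWhile_prefix _).getElem hi'] at hpx
    simpa using hpx
  have F2 : ∀ (h : L < ka.length), x < ka[L] := by
    intro hLl
    have hTD : ka.takeWhile (fun y => decide (y ≤ x)) ++ ka.dropWhile (fun y => decide (y ≤ x)) = ka :=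
      List.takeWhile_append_dropWhile
    have hDne : ka.dropWhile (fun y => decide (y ≤ x)) ≠ [] := by
      intro h
      have := congrArg List.length hTD
      rw [h] at this
      simp at this
      omega
    have hhead := List.head?_dropWhile_not (fun y => decide (y ≤ x)) ka
    rw [List.head?_eq_some_head hDne] at hhead
    simp only [decide_eq_false_iff_not, not_le] at hhead
    have e1 : ka[L]'hLl = (ka.dropWhile (fun y => decide (y ≤ x))).head hDne := by
      rw [List.getElem_of_eq hTD.symm hLl,
        List.getElem_append_right (by omega)]
      have h0 : L - (ka.takeWhile (fun y => decide (y ≤ x))).length = 0 := by omega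
      rw [List.getElem_of_eq rfl _]
      simp only [h0]
      exact List.getElem_zero _
    rw [e1]
    exact hhead
  have Mono := List.pairwise_iff_getElem.mp hpw
  have main : ∀ (fuel lo hi : Nat), hi - lo ≤ fuel → lo ≤ L → L ≤ hi → hi ≤ ka.length →
      pvBisect ka x lo hi = L := by
    intro fuel
    induction fuel with
    | zero =>
      intro lo hi h0 ha hb hc
      rw [pvBisect]
      have hn : ¬ lo < hi := by omega
      simp only [if_neg hn]
      omega
    | succ f ih =>
      intro lo hi h0 ha hb hc
      rw [pvBisect]
      by_cases hlt : lo < hi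
      · simp only [if_pos hlt]
        by_cases hle : ka.getD ((lo + hi) / 2) 0 ≤ x
        · simp only [if_pos hle]
          have hmlen : (lo + hi) / 2 < ka.length := by omega
          rw [List.getD_eq_getElem ka 0 hmlen] at hle
          have hmidL : (lo + hi) / 2 < L := by
            by_contra hcon
            have hLl : L < ka.length := by omega
            have hx := F2 hLl
            rcases Nat.lt_or_ge L ((lo + hi) / 2) with hlt2 | hge
            · have := Mono L ((lo + hi) / 2) hLl hmlen hlt2
              omega
            · have heq : L = (lo + hi) / 2 := by omega
              simp only [heq] at hx
              omega
          exact ih ((lo + hi) / 2 + 1) hi (by omega) (by omega) hb hc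
        · simp only [if_neg hle]
          have hmlen : (lo + hi) / 2 < ka.length := by omega
          rw [List.getD_eq_getElem ka 0 hmlen] at hle
          have hLmid : L ≤ (lo + hi) / 2 := by
            by_contra hcon
            have := F1 ((lo + hi) / 2) hmlen (by omega)
            omega
          exact ih lo ((lo + hi) / 2) (by omega) ha hLmid (by omega)
      · simp only [if_neg hlt]
        omega
  exact main (hi - lo) lo hi le_rfl h1 h2 h3

theorem pvTakeWhileAppendAll {p : Int → Bool} {l1 l2 : List Int}
    (h : ∀ y ∈ l1, p y = true) : (l1 ++ l2).takeWhile p = l1 ++ l2.takeWhile p := by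
  induction l1 with
  | nil => simp
  | cons a l ih =>
    have ha : p a = true := h a (by simp)
    simp [ha]
    exact ih (fun y hy => h y (by simp [hy]))

theorem pvEraseIdxMiddle (T D' : List Int) (d : Int) :
    (T ++ d :: D').eraseIdx T.length = T ++ D' := by
  induction T with
  | nil => simp
  | cons a t ih => simp [ih]

-- one round: A's step on (n-suffix, descending k, score) matches B's step on (ascending k, score)
theorem pvWarStep (N kb : List Int) (t : Nat) (s : Int)
    (ht : t < N.length)
    (hkb : kb.Pairwise (fun a b => a ≤ b)) (hne : kb ≠ []) :
    ∃ kb', kb'.Pairwise (fun a b => a ≤ b) ∧ kb'.length + 1 = kb.length ∧ ∃ s',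
      pvStepA (some (N.drop t, kb.reverse, s)) = some (N.drop (t + 1), kb'.reverse, s') ∧
      pvStepB N (some (kb, s)) t = some (kb', s') := by
  have hx : N.drop t = N[t] :: N.drop (t + 1) := List.drop_eq_getElem_cons ht
  have hlast : kb.getLast? = some (kb.getLast hne) := List.getLast?_eq_some_getLast hne
  have hA0 : PySem.List.pyGet? (N.drop t) 0 = some N[t] := by
    rw [hx]; exact PySem.List.pyGet?_zero_cons _ _
  have hA1 : PySem.List.pyGet? kb.reverse 0 = some (kb.getLast hne) := by
    rw [PySem.List.pyGet?_zero]
    rw [← List.head?_eq_getElem?, List.head?_reverse, hlast]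
  have hB0 : PySem.List.pyGet? N (t : Int) = some N[t] := by
    simp [List.getElem?_eq_getElem ht]
  have hB1 : PySem.List.pyGet? kb (-1) = some (kb.getLast hne) := by
    rw [PySem.List.pyGet?_neg_one, hlast]
  by_cases hgt : kb.getLast hne < N[t]
  · -- Naomi wins the round: A pops k's last (its min), B drops ka's head (its min)
    obtain ⟨h0, tl, rfl⟩ := List.exists_cons_of_ne_nil hne
    refine ⟨tl, hkb.of_cons, by simp, s + 1, ?_, ?_⟩
    · have hpop : PySem.List.pop? (tl.reverse ++ [h0]) (-1) = some (h0, tl.reverse) :=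
        PySem.List.pop?_last _ _
      have hrem : PySem.List.remove? (N.drop t) N[t] = some (N.drop (t + 1)) := by
        rw [hx]; exact PySem.List.remove?_cons_self _ _
      simp only [pvStepA, hA0, hA1]
      rw [if_pos hgt]
      simp [List.reverse_cons, hpop, hrem]
    · simp only [pvStepB, hB0, hB1]
      rw [if_pos hgt]
      simp
  · -- Ken wins the round: he plays his smallest card beating N[t] (or his overall
    -- smallest if his max merely ties); both programs discard the same value.
    have hrevpw : kb.reverse.Pairwise (fun a b : Int => b ≤ a) :=
      List.pairwise_reverse.mpr hkb
    have hsort : PySem.List.sorted kb.reverse (fun x => x) true = kb.reverse :=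
      PySem.List.sorted_rev_eq_self_of_pairwise kb.reverse (fun x => x) (by simpa using hrevpw)
    have hrem_n : PySem.List.remove? (N.drop t) N[t] = some (N.drop (t + 1)) := by
      rw [hx]; exact PySem.List.remove?_cons_self _ _
    have hTD : kb.takeWhile (fun y => decide (y ≤ N[t])) ++ kb.dropWhile (fun y => decide (y ≤ N[t])) = kb :=
      List.takeWhile_append_dropWhile
    have hTle : ∀ y ∈ kb.takeWhile (fun y => decide (y ≤ N[t])), y ≤ N[t] := by
      intro y hy; simpa using List.mem_takeWhile_imp hy
    by_cases hD0 : kb.dropWhile (fun y => decide (y ≤ N[t])) = []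
    · -- tie round: every card of k is ≤ N[t]; Ken discards his minimum
      have hkbT : kb.takeWhile (fun y => decide (y ≤ N[t])) = kb := by
        conv_rhs => rw [← hTD, hD0, List.append_nil]
      have hall : ∀ y ∈ kb, y ≤ N[t] := by intro y hy; exact hTle y (by rwa [hkbT])
      have hi : kb.reverse.takeWhile (fun e => decide (N[t] < e)) = [] := by
        rw [List.takeWhile_eq_nil_iff]
        intro hl
        have hmem : kb.reverse.get ⟨0, hl⟩ ∈ kb := List.mem_reverse.mp (List.get_mem _ _)
        have := hall _ hmem
        simp only [decide_eq_true_eq]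
        omega
      have hval : PySem.List.pyGet? kb.reverse (pvCountGreater N[t] kb.reverse 0 - 1)
          = some (kb.head hne) := by
        rw [pvCountGreater_eq, hi]
        norm_num
        rw [PySem.List.pyGet?_neg_one, List.getLast?_reverse, List.head?_eq_some_head hne]
      have hmemrev : kb.head hne ∈ kb.reverse := List.mem_reverse.mpr (List.head_mem hne)
      have hremA : PySem.List.remove? kb.reverse (kb.head hne)
          = some (kb.reverse.erase (kb.head hne)) := PySem.List.remove?_eq_some_erase _ _ hmemrev
      have hE1 : kb.reverse.erase (kb.head hne) = kb.tail.reverse := by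
        refine pvDescEq (List.Pairwise.sublist (List.erase_sublist) hrevpw)
          (List.pairwise_reverse.mpr (List.Pairwise.sublist (List.tail_sublist kb) hkb)) ?_
        have p1 : kb.reverse.Perm (kb.head hne :: kb.reverse.erase (kb.head hne)) :=
          List.perm_cons_erase hmemrev
        have p2 : kb.reverse.Perm (kb.head hne :: kb.tail) := by
          rw [List.cons_head_tail hne]; exact List.reverse_perm kb
        exact ((p1.symm.trans p2).cons_inv).trans (List.reverse_perm kb.tail).symm
      have hj : pvBisect kb N[t] 0 kb.length = kb.length := by
        rw [pvBisect_eq kb N[t] hkb 0 kb.length (Nat.zero_le _)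
          (List.takeWhile_prefix _).length_le le_rfl, hkbT]
      refine ⟨kb.tail, List.Pairwise.sublist (List.tail_sublist kb) hkb,
        by cases kb with | nil => exact absurd rfl hne | cons a l => simp, s, ?_, ?_⟩
      · simp only [pvStepA, hA0, hA1]
        rw [if_neg hgt]
        simp only [get_opt_num, hsort, hval, hremA, hrem_n, hE1]
      · simp only [pvStepB, hB0, hB1]
        rw [if_neg hgt]
        simp only [hj]
        cases kb with | nil => exact absurd rfl hne | cons a l => simp [List.eraseIdx]
    · -- strict round: Ken discards his smallest card beating N[t]
      obtain ⟨d, D', hDD⟩ := List.exists_cons_of_ne_nil hD0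
      rw [hDD] at hTD
      have hpd : (fun y => decide (y ≤ N[t])) d = false := by
        have := List.head?_dropWhile_not (fun y => decide (y ≤ N[t])) kb
        rw [hDD] at this; simpa using this
      have hxd : N[t] < d := by simpa using hpd
      generalize hgenT : kb.takeWhile (fun y => decide (y ≤ N[t])) = T at hTD hTle
      have hsubD : (d :: D').Sublist kb := by
        rw [← hTD]; exact List.sublist_append_right _ _
      have hpwD : (d :: D').Pairwise (fun a b : Int => a ≤ b) :=
        List.Pairwise.sublist hsubD hkb
      have hDgt : ∀ y ∈ d :: D', N[t] < y := by
        intro y hy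
        rcases List.mem_cons.mp hy with h | h
        · exact h ▸ hxd
        · have : d ≤ y := (List.pairwise_cons.mp hpwD).1 y h
          omega
      have hiA : kb.reverse.takeWhile (fun e => decide (N[t] < e))
          = (d :: D').reverse := by
        conv_lhs => rw [← hTD]
        rw [List.reverse_append]
        rw [pvTakeWhileAppendAll (by
          intro y hy
          rw [List.mem_reverse] at hy
          simpa using hDgt y hy)]
        rw [List.takeWhile_eq_nil_iff.mpr (by
          intro hl
          have hmem := List.mem_reverse.mp (List.get_mem _ (⟨0, hl⟩ : Fin _))
          have := hTle _ hmem
          simp only [decide_eq_true_eq]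
          omega), List.append_nil]
      have hval : PySem.List.pyGet? kb.reverse (pvCountGreater N[t] kb.reverse 0 - 1)
          = some d := by
        rw [pvCountGreater_eq, hiA]
        have hcast : (0 : Int) + (((d :: D').reverse).length : Int) - 1 = ((D'.length : Nat) : Int) := by
          simp
        rw [hcast, PySem.List.pyGet?_natCast]
        conv_lhs => rw [← hTD, List.reverse_append]
        rw [List.getElem?_append_left (by simp)]
        rw [List.getElem?_eq_getElem (by simp)]
        simp
      have hmemd : d ∈ kb.reverse := by
        rw [List.mem_reverse]
        exact hsubD.mem (List.mem_cons_self)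
      have hremA : PySem.List.remove? kb.reverse d = some (kb.reverse.erase d) :=
        PySem.List.remove?_eq_some_erase _ _ hmemd
      have hsub' : (T ++ D').Sublist kb := by
        conv_rhs => rw [← hTD]
        exact (List.sublist_cons_self d D').append_left _
      have hE1 : kb.reverse.erase d = (T ++ D').reverse := by
        refine pvDescEq (List.Pairwise.sublist (List.erase_sublist) hrevpw)
          (List.pairwise_reverse.mpr (List.Pairwise.sublist hsub' hkb)) ?_
        have p1 : kb.reverse.Perm (d :: kb.reverse.erase d) := List.perm_cons_erase hmemd
        have p2 : kb.reverse.Perm (d :: (T ++ D')) := by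
          refine (List.reverse_perm kb).trans ?_
          conv_lhs => rw [← hTD]
          exact List.perm_middle
        exact ((p1.symm.trans p2).cons_inv).trans (List.reverse_perm _).symm
      have hj : pvBisect kb N[t] 0 kb.length = T.length := by
        rw [pvBisect_eq kb N[t] hkb 0 kb.length (Nat.zero_le _)
          (List.takeWhile_prefix _).length_le le_rfl, hgenT]
      have hlenTD := congrArg List.length hTD
      simp at hlenTD
      have hjne : T.length ≠ kb.length := by omega
      have hjerase : kb.eraseIdx T.length = T ++ D' := by
        conv_lhs => rw [← hTD]
        exact pvEraseIdxMiddle _ _ _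
      refine ⟨T ++ D', List.Pairwise.sublist hsub' hkb, ?_, s, ?_, ?_⟩
      · simp
        omega
      · simp only [pvStepA, hA0, hA1]
        rw [if_neg hgt]
        simp only [get_opt_num, hsort, hval, hremA, hrem_n, hE1]
      · simp only [pvStepB, hB0, hB1]
        rw [if_neg hgt]
        simp only [hj, if_neg hjne, hjerase]

-- loop invariant: after m rounds the two foldls carry reverse-related k-lists and equal scores
theorem pvWarInv (n k : List Int) (m : Nat) (hm : m ≤ n.length) (hm2 : m ≤ k.length) :
    ∃ (kb : List Int) (s : Int),
      kb.Pairwise (fun a b => a ≤ b) ∧ kb.length = k.length - m ∧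
      (List.range m).foldl (fun st _ => pvStepA st)
          (some (PySem.List.sorted n (fun x => x) true, PySem.List.sorted k (fun x => x) true, 0))
        = some ((PySem.List.sorted n (fun x => x) true).drop m, kb.reverse, s) ∧
      (List.range m).foldl (pvStepB (PySem.List.sorted n (fun x => x) true))
          (some (PySem.List.sorted k (fun x => x) false, 0))
        = some (kb, s) := by
  induction m with
  | zero =>
    refine ⟨PySem.List.sorted k (fun x => x) false, 0, ?_, ?_, ?_, ?_⟩
    · simpa using PySem.List.sorted_pairwise k (fun x => x)
    · simp [PySem.List.length_sorted]
    · simp only [List.range_zero, List.foldl_nil, List.drop_zero]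
      have hk : PySem.List.sorted k (fun x => x) true
          = (PySem.List.sorted k (fun x => x) false).reverse := by
        refine pvDescEq ?_ ?_ ?_
        · simpa using PySem.List.sorted_pairwise_rev k (fun x => x)
        · rw [List.pairwise_reverse]
          simpa using PySem.List.sorted_pairwise k (fun x => x)
        · exact (PySem.List.sorted_perm k (fun x => x) true).trans
            ((PySem.List.sorted_perm k (fun x => x) false).symm.trans
              (List.reverse_perm _).symm)
      rw [hk]
    · simp
  | succ m ih =>
    obtain ⟨kb, s, hpw, hlen, hA, hB⟩ := ih (by omega) (by omega)
    have ht : m < (PySem.List.sorted n (fun x => x) true).length := by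
      rw [PySem.List.length_sorted]; omega
    have hne : kb ≠ [] := by
      intro h; rw [h] at hlen; simp at hlen; omega
    obtain ⟨kb', hpw', hlen', s', hA', hB'⟩ := pvWarStep _ kb m s ht hpw hne
    refine ⟨kb', s', hpw', by omega, ?_, ?_⟩
    · rw [List.range_succ, List.foldl_append, hA]
      simpa using hA'
    · rw [List.range_succ, List.foldl_append, hB]
      simpa using hB'

-- ===== VERDICT (by name: the statement is the Claim_ definition above) =====
theorem get_score_of_war_spec : Claim_equal_get_score_of_war := by
  intro n k num _ hpre
  obtain ⟨h1, h2⟩ := hpre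
  have hm : num.toNat ≤ n.length := by omega
  have hm2 : num.toNat ≤ k.length := by omega
  obtain ⟨kb, s, _, _, hA, hB⟩ := pvWarInv n k num.toNat hm hm2
  unfold Spec_get_score_of_war get_score_of_war get_score_of_war_alt
  rw [hA, hB]
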